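-- pv_equiv track=rewrite | github.com/christoskyriakou/Erg2 | graph_utils.py | graph_to_csr
-- ===== SOURCE A (Python) =====
-- def graph_to_csr(ugraph):
--     """Convert undirected weighted graph to CSR format"""
--     n = len(ugraph)
--     xadj = [0]
--     adjncy = []
--     adjcwgt = []
--
--     for i in range(n):
--         for j, w in ugraph[i].items():
--             adjncy.append(j)
--             adjcwgt.append(w)
--         xadj.append(len(adjncy))
--
--     return xadj, adjncy, adjcwgt
-- ===== SOURCE B (Python) =====
-- def graph_to_csr(ugraph):
--     """Convert undirected weighted graph to CSR format"""
--     degrees = [len(row) for row in ugraph]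
--     xadj = [0]
--     for d in degrees:
--         xadj.append(xadj[-1] + d)
--     adjncy = [j for row in ugraph for j in row]
--     adjcwgt = [w for row in ugraph for w in row.values()]
--     return xadj, adjncy, adjcwgt
-- ===== Notes on version B (the rewrite author's own statement) =====
-- stated objective: alternative
-- what changed: Replaces A's single fused loop (which rebuilds xadj from the running length of adjncy) with a count-then-prefix-sum phase over a degree list plus two independent flattening comprehensions for adjncy/adjcwgt.
import Mathlib
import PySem

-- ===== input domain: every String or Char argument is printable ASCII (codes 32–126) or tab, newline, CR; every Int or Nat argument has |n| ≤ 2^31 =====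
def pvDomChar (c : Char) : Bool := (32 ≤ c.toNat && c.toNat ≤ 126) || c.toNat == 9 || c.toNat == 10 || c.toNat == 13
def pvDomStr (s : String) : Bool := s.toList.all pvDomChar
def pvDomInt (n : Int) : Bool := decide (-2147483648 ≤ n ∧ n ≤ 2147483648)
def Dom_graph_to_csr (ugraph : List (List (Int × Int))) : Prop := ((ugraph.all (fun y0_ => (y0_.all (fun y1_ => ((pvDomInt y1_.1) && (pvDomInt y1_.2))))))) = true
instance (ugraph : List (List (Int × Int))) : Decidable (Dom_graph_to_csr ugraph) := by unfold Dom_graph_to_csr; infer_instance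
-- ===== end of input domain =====

-- B replaces A's fused loop by a degree-list prefix sum plus two independent flattening passes; same cost, different decomposition.
-- Each inner assoc list represents a Python dict; items()/keys()/values() are ported through PySem.Dict.ofList in both ports.

-- ===== PORT A =====
-- body of A's outer loop: append row's keys/weights, then append len(adjncy) to xadj
def stepA_graph_to_csr (st : List Int × List Int × List Int) (row : List (Int × Int)) :
    List Int × List Int × List Int :=
  let inner := (PySem.Dict.ofList row).items.foldl
    (fun (p : List Int × List Int) jw => (p.1 ++ [jw.1], p.2 ++ [jw.2])) (st.2.1, st.2.2)
  (st.1 ++ [(inner.1.length : Int)], inner.1, inner.2)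

def graph_to_csr (ugraph : List (List (Int × Int))) : List Int × List Int × List Int :=
  let n : Int := ugraph.length
  (PySem.List.pyRange 0 n 1).foldl
    (fun st i => stepA_graph_to_csr st (PySem.List.pyGetD ugraph i [])) ([0], [], [])

-- ===== PORT B =====
def graph_to_csr_alt (ugraph : List (List (Int × Int))) : List Int × List Int × List Int :=
  let degrees : List Int := ugraph.map (fun row => ((PySem.Dict.ofList row).items.length : Int))
  let xadj : List Int := degrees.foldl (fun acc d => acc ++ [PySem.List.pyGetD acc (-1) 0 + d]) [0]
  let adjncy : List Int := ugraph.flatMap (fun row => (PySem.Dict.ofList row).items.map Prod.fst)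
  let adjcwgt : List Int := ugraph.flatMap (fun row => (PySem.Dict.ofList row).items.map Prod.snd)
  (xadj, adjncy, adjcwgt)

-- ===== PRECONDITION & SPEC =====
def Spec_graph_to_csr (ugraph : List (List (Int × Int))) (out : List Int × List Int × List Int) : Prop := out = graph_to_csr_alt ugraph
instance (ugraph : List (List (Int × Int))) (out : List Int × List Int × List Int) : Decidable (Spec_graph_to_csr ugraph out) := by unfold Spec_graph_to_csr; infer_instance

-- ===== CLAIM (what is proved, stated in full; the proofs are below) =====
def Claim_equal_graph_to_csr : Prop := ∀ (ugraph : List (List (Int × Int))), Dom_graph_to_csr ugraph → Spec_graph_to_csr ugraph (graph_to_csr ugraph)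

-- ===== LEMMAS AND PROOFS =====

-- A's inner loop appends the row's keys to adjncy and values to adjcwgt
lemma inner_eq (row : List (Int × Int)) : ∀ (an aw : List Int),
    row.foldl (fun (p : List Int × List Int) jw => (p.1 ++ [jw.1], p.2 ++ [jw.2])) (an, aw)
      = (an ++ row.map Prod.fst, aw ++ row.map Prod.snd) := by
  induction row with
  | nil => simp
  | cons jw rest ih => intro an aw; simp [ih]

-- invariant for A's outer loop: xadj's last entry is the current adjncy length
lemma fold_eq (gs : List (List (Int × Int))) : ∀ (xa' an aw : List Int),
    gs.foldl stepA_graph_to_csr (xa' ++ [(an.length : Int)], an, aw)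
      = (gs.foldl (fun acc row =>
            acc ++ [PySem.List.pyGetD acc (-1) 0 + ((PySem.Dict.ofList row).items.length : Int)])
            (xa' ++ [(an.length : Int)]),
         an ++ gs.flatMap (fun row => (PySem.Dict.ofList row).items.map Prod.fst),
         aw ++ gs.flatMap (fun row => (PySem.Dict.ofList row).items.map Prod.snd)) := by
  induction gs with
  | nil => intro xa' an aw; simp
  | cons row rest ih =>
    intro xa' an aw
    have hstep : stepA_graph_to_csr (xa' ++ [(an.length : Int)], an, aw) row
        = ((xa' ++ [(an.length : Int)]) ++ [((an ++ (PySem.Dict.ofList row).items.map Prod.fst).length : Int)],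
           an ++ (PySem.Dict.ofList row).items.map Prod.fst,
           aw ++ (PySem.Dict.ofList row).items.map Prod.snd) := by
      simp [stepA_graph_to_csr, inner_eq]
    simp only [List.foldl_cons, hstep, ih]
    have harg : ((an ++ (PySem.Dict.ofList row).items.map Prod.fst).length : Int)
        = PySem.List.pyGetD (xa' ++ [(an.length : Int)]) (-1) 0
            + ((PySem.Dict.ofList row).items.length : Int) := by
      rw [PySem.List.pyGetD_neg_one_append_singleton]; simp
    rw [harg]
    simp [List.append_assoc]

theorem graph_to_csr_key (ugraph : List (List (Int × Int))) :
    graph_to_csr ugraph = graph_to_csr_alt ugraph := by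
  unfold graph_to_csr graph_to_csr_alt
  rw [PySem.List.foldl_pyRange_zero_pyGetD' ugraph [] stepA_graph_to_csr ([0], [], [])]
  have h := fold_eq ugraph [] [] []
  simp only [List.nil_append, List.length_nil, Int.natCast_zero] at h
  rw [h]
  simp [List.foldl_map]

-- ===== VERDICT (by name: the statement is the Claim_ definition above) =====
theorem graph_to_csr_spec : Claim_equal_graph_to_csr := by
  intro ugraph _
  unfold Spec_graph_to_csr
  exact graph_to_csr_key ugraph
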